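-- pv_equiv track=rewrite | github.com/RaulAdSe/aec-agent | src/extraction/ifc_extractor.py | _classify_level_function
-- ===== SOURCE A (Python) =====
-- def _classify_level_function(level_name: str, doors_count: int, walls_count: int) -> str:
--     """Classify the function of a building level."""
--     name_lower = level_name.lower()
--
--     # Main activity levels (high door count)
--     if doors_count > 10:
--         if any(keyword in name_lower for keyword in ['muelle', 'loading', 'dock']):
--             return "Loading/Shipping Operations"
--         elif any(keyword in name_lower for keyword in ['taller', 'workshop', 'production']):
--             return "Manufacturing/Workshop"
--         elif any(keyword in name_lower for keyword in ['main', 'principal', 'ground', 'pb']):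
--             return "Main Operations Floor"
--         else:
--             return "Active Operations Level"
--
--     # Service/utility levels (walls but few doors)
--     elif walls_count > 0 and doors_count < 3:
--         if any(keyword in name_lower for keyword in ['roof', 'cubierta', 'peto']):
--             return "Roof/Structural Level"
--         elif any(keyword in name_lower for keyword in ['mechanical', 'hvac', 'utility']):
--             return "Mechanical/Utility Level"
--         elif any(keyword in name_lower for keyword in ['basement', 'sotano', 'foundation']):
--             return "Foundation/Service Level"
--         else:
--             return "Service/Structural Level"
--
--     # Mixed use levels
--     elif doors_count > 0 and walls_count > 0:
--         if any(keyword in name_lower for keyword in ['altillo', 'mezzanine']):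
--             return "Mezzanine/Intermediate Level"
--         elif any(keyword in name_lower for keyword in ['office', 'admin']):
--             return "Administrative Level"
--         else:
--             return "Mixed Use Level"
--
--     # Empty/structural only
--     else:
--         return "Structural/Unused Level"
-- ===== SOURCE B (Python) =====
-- # Flat rule index: compute a numeric tier first, then one single scan over a
-- # flat (tier, keyword, label) list; defaults looked up from a table by tier.
-- _RULES = [
--     (0, 'muelle', "Loading/Shipping Operations"),
--     (0, 'loading', "Loading/Shipping Operations"),
--     (0, 'dock', "Loading/Shipping Operations"),
--     (0, 'taller', "Manufacturing/Workshop"),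
--     (0, 'workshop', "Manufacturing/Workshop"),
--     (0, 'production', "Manufacturing/Workshop"),
--     (0, 'main', "Main Operations Floor"),
--     (0, 'principal', "Main Operations Floor"),
--     (0, 'ground', "Main Operations Floor"),
--     (0, 'pb', "Main Operations Floor"),
--     (1, 'roof', "Roof/Structural Level"),
--     (1, 'cubierta', "Roof/Structural Level"),
--     (1, 'peto', "Roof/Structural Level"),
--     (1, 'mechanical', "Mechanical/Utility Level"),
--     (1, 'hvac', "Mechanical/Utility Level"),
--     (1, 'utility', "Mechanical/Utility Level"),
--     (1, 'basement', "Foundation/Service Level"),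
--     (1, 'sotano', "Foundation/Service Level"),
--     (1, 'foundation', "Foundation/Service Level"),
--     (2, 'altillo', "Mezzanine/Intermediate Level"),
--     (2, 'mezzanine', "Mezzanine/Intermediate Level"),
--     (2, 'office', "Administrative Level"),
--     (2, 'admin', "Administrative Level"),
-- ]
--
-- _DEFAULTS = [
--     "Active Operations Level",
--     "Service/Structural Level",
--     "Mixed Use Level",
--     "Structural/Unused Level",
-- ]
--
--
-- def _classify_level_function(level_name: str, doors_count: int, walls_count: int) -> str:
--     name = level_name.lower()
--     tier = (0 if doors_count > 10 else
--             1 if walls_count > 0 and doors_count < 3 else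
--             2 if doors_count > 0 and walls_count > 0 else
--             3)
--     for t, kw, label in _RULES:
--         if t == tier and kw in name:
--             return label
--     return _DEFAULTS[tier]
-- ===== Notes on version B (the rewrite author's own statement) =====
-- stated objective: alternative
-- what changed: Replaced the nested if/elif keyword-group cascade by a two-stage computation: an arithmetic tier number (0-3) computed first, then one flat scan over a single (tier, keyword, label) rule list with per-keyword entries, falling back to a defaults table indexed by tier.
import Mathlib
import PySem

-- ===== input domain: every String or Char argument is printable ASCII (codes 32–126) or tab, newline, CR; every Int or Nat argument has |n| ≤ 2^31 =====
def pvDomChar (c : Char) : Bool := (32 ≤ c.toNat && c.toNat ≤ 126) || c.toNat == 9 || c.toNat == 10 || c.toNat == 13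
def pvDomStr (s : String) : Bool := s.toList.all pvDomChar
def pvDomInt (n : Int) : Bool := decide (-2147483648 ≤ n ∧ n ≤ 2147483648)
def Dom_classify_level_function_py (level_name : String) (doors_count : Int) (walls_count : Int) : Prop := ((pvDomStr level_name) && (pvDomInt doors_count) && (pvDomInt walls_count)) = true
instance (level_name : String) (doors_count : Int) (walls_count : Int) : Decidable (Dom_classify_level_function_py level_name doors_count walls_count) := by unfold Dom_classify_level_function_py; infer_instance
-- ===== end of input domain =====

-- B computes a numeric tier first, then one flat scan over a (tier,keyword,label) rule list (objective: alternative decomposition, same cost).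

-- ===== PORT A =====
def classify_level_function_py (level_name : String) (doors_count : Int) (walls_count : Int) : String :=
  let name_lower := PySem.Str.lower level_name
  if doors_count > 10 then
    if ["muelle", "loading", "dock"].any (fun k => PySem.Str.isIn k name_lower) then
      "Loading/Shipping Operations"
    else if ["taller", "workshop", "production"].any (fun k => PySem.Str.isIn k name_lower) then
      "Manufacturing/Workshop"
    else if ["main", "principal", "ground", "pb"].any (fun k => PySem.Str.isIn k name_lower) then
      "Main Operations Floor"
    else
      "Active Operations Level"
  else if walls_count > 0 ∧ doors_count < 3 then
    if ["roof", "cubierta", "peto"].any (fun k => PySem.Str.isIn k name_lower) then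
      "Roof/Structural Level"
    else if ["mechanical", "hvac", "utility"].any (fun k => PySem.Str.isIn k name_lower) then
      "Mechanical/Utility Level"
    else if ["basement", "sotano", "foundation"].any (fun k => PySem.Str.isIn k name_lower) then
      "Foundation/Service Level"
    else
      "Service/Structural Level"
  else if doors_count > 0 ∧ walls_count > 0 then
    if ["altillo", "mezzanine"].any (fun k => PySem.Str.isIn k name_lower) then
      "Mezzanine/Intermediate Level"
    else if ["office", "admin"].any (fun k => PySem.Str.isIn k name_lower) then
      "Administrative Level"
    else
      "Mixed Use Level"
  else
    "Structural/Unused Level"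

-- ===== PORT B =====
-- the flat rule list _RULES of Source B: (tier, keyword, label) per keyword
def pvRules : List (Nat × String × String) :=
  [ (0, "muelle", "Loading/Shipping Operations"),
    (0, "loading", "Loading/Shipping Operations"),
    (0, "dock", "Loading/Shipping Operations"),
    (0, "taller", "Manufacturing/Workshop"),
    (0, "workshop", "Manufacturing/Workshop"),
    (0, "production", "Manufacturing/Workshop"),
    (0, "main", "Main Operations Floor"),
    (0, "principal", "Main Operations Floor"),
    (0, "ground", "Main Operations Floor"),
    (0, "pb", "Main Operations Floor"),
    (1, "roof", "Roof/Structural Level"),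
    (1, "cubierta", "Roof/Structural Level"),
    (1, "peto", "Roof/Structural Level"),
    (1, "mechanical", "Mechanical/Utility Level"),
    (1, "hvac", "Mechanical/Utility Level"),
    (1, "utility", "Mechanical/Utility Level"),
    (1, "basement", "Foundation/Service Level"),
    (1, "sotano", "Foundation/Service Level"),
    (1, "foundation", "Foundation/Service Level"),
    (2, "altillo", "Mezzanine/Intermediate Level"),
    (2, "mezzanine", "Mezzanine/Intermediate Level"),
    (2, "office", "Administrative Level"),
    (2, "admin", "Administrative Level") ]

-- the _DEFAULTS table of Source B, indexed by tier
def pvDefaults : List String :=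
  ["Active Operations Level", "Service/Structural Level", "Mixed Use Level", "Structural/Unused Level"]

-- the for-loop of Source B: first matching rule's label, else the fall-through default
def pvScanRules (name : String) (tier : Nat) (dflt : String) : List (Nat × String × String) → String
  | [] => dflt
  | (t, kw, label) :: rest =>
    if t == tier && PySem.Str.isIn kw name then label
    else pvScanRules name tier dflt rest

def classify_level_function_py_alt (level_name : String) (doors_count : Int) (walls_count : Int) : String :=
  let name := PySem.Str.lower level_name
  let tier : Nat :=
    if doors_count > 10 then 0
    else if walls_count > 0 ∧ doors_count < 3 then 1
    else if doors_count > 0 ∧ walls_count > 0 then 2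
    else 3
  pvScanRules name tier (pvDefaults.getD tier "") pvRules

-- ===== PRECONDITION & SPEC =====
def Spec_classify_level_function_py (level_name : String) (doors_count : Int) (walls_count : Int) (out : String) : Prop := out = classify_level_function_py_alt level_name doors_count walls_count
instance (level_name : String) (doors_count : Int) (walls_count : Int) (out : String) : Decidable (Spec_classify_level_function_py level_name doors_count walls_count out) := by unfold Spec_classify_level_function_py; infer_instance

-- ===== CLAIM (what is proved, stated in full; the proofs are below) =====
def Claim_equal_classify_level_function_py : Prop := ∀ (level_name : String) (doors_count : Int) (walls_count : Int), Dom_classify_level_function_py level_name doors_count walls_count → Spec_classify_level_function_py level_name doors_count walls_count (classify_level_function_py level_name doors_count walls_count)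

-- ===== LEMMAS AND PROOFS =====

-- ===== VERDICT (by name: the statement is the Claim_ definition above) =====
-- merging two ifs with the same result into one or-condition (B's per-keyword chain → A's grouped any)
theorem pv_if_or {α : Type} (a b : Bool) (x y : α) :
    (if a = true then x else if b = true then x else y) = (if (a || b) = true then x else y) := by
  cases a <;> cases b <;> simp

-- the flat scan at tier 0 equals A's first keyword cascade
theorem pv_scan_tier0 (name dflt : String) :
    pvScanRules name 0 dflt pvRules =
      (if ["muelle", "loading", "dock"].any (fun k => PySem.Str.isIn k name) then
        "Loading/Shipping Operations"
      else if ["taller", "workshop", "production"].any (fun k => PySem.Str.isIn k name) then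
        "Manufacturing/Workshop"
      else if ["main", "principal", "ground", "pb"].any (fun k => PySem.Str.isIn k name) then
        "Main Operations Floor"
      else dflt) := by
  simp only [pvScanRules, pvRules, List.any_cons, List.any_nil, Bool.or_false,
    Nat.reduceBEq, beq_self_eq_true, Bool.true_and, Bool.false_and, if_false,
    Bool.false_eq_true, pv_if_or]

-- the flat scan at tier 1 equals A's second keyword cascade
theorem pv_scan_tier1 (name dflt : String) :
    pvScanRules name 1 dflt pvRules =
      (if ["roof", "cubierta", "peto"].any (fun k => PySem.Str.isIn k name) then
        "Roof/Structural Level"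
      else if ["mechanical", "hvac", "utility"].any (fun k => PySem.Str.isIn k name) then
        "Mechanical/Utility Level"
      else if ["basement", "sotano", "foundation"].any (fun k => PySem.Str.isIn k name) then
        "Foundation/Service Level"
      else dflt) := by
  simp only [pvScanRules, pvRules, List.any_cons, List.any_nil, Bool.or_false,
    Nat.reduceBEq, beq_self_eq_true, Bool.true_and, Bool.false_and, if_false,
    Bool.false_eq_true, pv_if_or]

-- the flat scan at tier 2 equals A's third keyword cascade
theorem pv_scan_tier2 (name dflt : String) :
    pvScanRules name 2 dflt pvRules =
      (if ["altillo", "mezzanine"].any (fun k => PySem.Str.isIn k name) then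
        "Mezzanine/Intermediate Level"
      else if ["office", "admin"].any (fun k => PySem.Str.isIn k name) then
        "Administrative Level"
      else dflt) := by
  simp only [pvScanRules, pvRules, List.any_cons, List.any_nil, Bool.or_false,
    Nat.reduceBEq, beq_self_eq_true, Bool.true_and, Bool.false_and, if_false,
    Bool.false_eq_true, pv_if_or]

-- the flat scan at tier 3 matches no rule and yields the default
theorem pv_scan_tier3 (name dflt : String) :
    pvScanRules name 3 dflt pvRules = dflt := by
  simp only [pvScanRules, pvRules, Nat.reduceBEq, Bool.false_and,
    Bool.false_eq_true, ite_false]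

-- ===== VERDICT (by name: the statement is the Claim_ definition above) =====
theorem classify_level_function_py_spec : Claim_equal_classify_level_function_py := by
  intro level_name doors_count walls_count _
  show _ = _
  simp only [classify_level_function_py, classify_level_function_py_alt]
  by_cases h1 : doors_count > 10
  · simp only [if_pos h1, pv_scan_tier0, pvDefaults, List.getD]; rfl
  · by_cases h2 : walls_count > 0 ∧ doors_count < 3
    · simp only [if_neg h1, if_pos h2, pv_scan_tier1, pvDefaults, List.getD]; rfl
    · by_cases h3 : doors_count > 0 ∧ walls_count > 0
      · simp only [if_neg h1, if_neg h2, if_pos h3, pv_scan_tier2, pvDefaults, List.getD]; rfl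
      · simp only [if_neg h1, if_neg h2, if_neg h3, pv_scan_tier3, pvDefaults, List.getD]; rfl
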